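-- pv_equiv track=rewrite | github.com/N-Khoa/ctdl | BaiTapCK/chuong6/b3.py | Giao
-- ===== SOURCE A (Python) =====
-- def Giao(arr1, arr2):
--     # Khởi tạo mảng kết quả rỗng
--     result = []
--     # Tạo một set từ mảng arr1 để tối ưu việc kiểm tra tồn tại
--     set_arr1 = set(arr1)
--     # Duyệt qua từng phần tử trong mảng arr2
--     for num in arr2:
--         # Nếu phần tử có trong cả mảng arr1 và không trùng với các phần tử đã thêm vào mảng kết quả, thêm vào mảng kết quả
--         if num in set_arr1 and num not in result:
--             result.append(num)
--
--     # Sắp xếp mảng kết quả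
--     result.sort()
--     return result
-- ===== SOURCE B (Python) =====
-- def Giao(arr1, arr2):
--     a = sorted(arr1)
--     b = sorted(arr2)
--     i = j = 0
--     result = []
--     while i < len(a) and j < len(b):
--         if a[i] < b[j]:
--             i += 1
--         elif b[j] < a[i]:
--             j += 1
--         else:
--             if not result or result[-1] != a[i]:
--                 result.append(a[i])
--             i += 1
--             j += 1
--     return result
-- ===== Notes on version B (the rewrite author's own statement) =====
-- stated objective: alternative
-- what changed: Replaces A's hash-set membership loop with list-scan dedup plus final sort by a sort-both-inputs then two-pointer merge walk that emits the common elements in sorted order, deduplicating via the last emitted element.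
import Mathlib
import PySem

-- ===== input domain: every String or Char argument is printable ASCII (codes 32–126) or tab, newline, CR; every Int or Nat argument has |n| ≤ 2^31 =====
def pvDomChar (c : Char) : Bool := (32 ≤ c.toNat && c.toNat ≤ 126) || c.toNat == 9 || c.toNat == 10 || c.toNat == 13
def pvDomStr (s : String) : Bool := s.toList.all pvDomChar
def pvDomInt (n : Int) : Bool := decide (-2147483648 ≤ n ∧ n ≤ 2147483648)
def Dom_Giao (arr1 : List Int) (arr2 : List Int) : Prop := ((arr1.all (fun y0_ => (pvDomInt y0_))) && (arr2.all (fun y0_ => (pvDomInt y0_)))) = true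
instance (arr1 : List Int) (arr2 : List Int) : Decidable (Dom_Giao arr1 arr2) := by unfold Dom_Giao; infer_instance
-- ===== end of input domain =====

-- B replaces A's set-membership loop + list-dedup + final sort by sorting both
-- inputs first and walking them with a two-pointer merge that emits common
-- elements in order (dedup via the last emitted element) — alternative algorithm.


-- ===== PORT A =====
def Giao (arr1 : List Int) (arr2 : List Int) : List Int :=
  let set_arr1 := PySem.Set.ofList arr1
  let result := arr2.foldl
    (fun result num =>
      if PySem.Set.contains set_arr1 num && !(result.contains num)
      then result ++ [num] else result) []
  PySem.List.sorted result (fun x => x) false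

-- ===== PORT B =====
-- the while loop of Source B: advance in the sorted lists, appending a common
-- element when it differs from the last appended one (result[-1])
def giaoMerge (result : List Int) : List Int → List Int → List Int
  | [], _ => result
  | _ :: _, [] => result
  | x :: xs, y :: ys =>
    if x < y then giaoMerge result xs (y :: ys)
    else if y < x then giaoMerge result (x :: xs) ys
    else if result.getLast? ≠ some x then giaoMerge (result ++ [x]) xs ys
    else giaoMerge result xs ys
termination_by a b => a.length + b.length
decreasing_by all_goals simp <;> omega

def Giao_alt (arr1 : List Int) (arr2 : List Int) : List Int :=
  giaoMerge [] (PySem.List.sorted arr1 (fun x => x) false)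
              (PySem.List.sorted arr2 (fun x => x) false)

-- ===== PRECONDITION & SPEC =====
def Spec_Giao (arr1 : List Int) (arr2 : List Int) (out : List Int) : Prop := out = Giao_alt arr1 arr2
instance (arr1 : List Int) (arr2 : List Int) (out : List Int) : Decidable (Spec_Giao arr1 arr2 out) := by unfold Spec_Giao; infer_instance

-- ===== CLAIM (what is proved, stated in full; the proofs are below) =====
def Claim_equal_Giao : Prop := ∀ (arr1 : List Int) (arr2 : List Int), Dom_Giao arr1 arr2 → Spec_Giao arr1 arr2 (Giao arr1 arr2)

-- ===== LEMMAS AND PROOFS =====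

-- Invariant of A's accumulating loop: a duplicate-free accumulator whose final
-- members are the accumulator's plus the elements common to arr1 and arr2.
theorem giao_foldl_inv (arr1 arr2 : List Int) (acc : List Int) (hnd : acc.Nodup) :
    (arr2.foldl
      (fun result num =>
        if PySem.Set.contains (PySem.Set.ofList arr1) num && !(result.contains num)
        then result ++ [num] else result) acc).Nodup ∧
    ∀ x, x ∈ (arr2.foldl
      (fun result num =>
        if PySem.Set.contains (PySem.Set.ofList arr1) num && !(result.contains num)
        then result ++ [num] else result) acc) ↔ x ∈ acc ∨ (x ∈ arr2 ∧ x ∈ arr1) := by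
  induction arr2 generalizing acc with
  | nil => simp [hnd]
  | cons a t ih =>
    simp only [List.foldl_cons]
    by_cases hin : PySem.Set.contains (PySem.Set.ofList arr1) a = true
    · have hin' : a ∈ arr1 := (PySem.Set.mem_ofList _ _).mp ((PySem.Set.contains_iff _ _).mp hin)
      by_cases hmem : a ∈ acc
      · have hc : acc.contains a = true := by simpa using hmem
        rw [hin, hc]
        simp only [Bool.not_true, Bool.and_false, Bool.false_eq_true, if_false]
        obtain ⟨h1, h2⟩ := ih acc hnd
        refine ⟨h1, fun x => ?_⟩
        rw [h2]
        simp only [List.mem_cons]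
        rcases eq_or_ne x a with rfl | hne
        · tauto
        · tauto
      · have hc : acc.contains a = false := by simpa using hmem
        rw [hin, hc]
        simp only [Bool.not_false, Bool.and_self, if_true]
        have hnd' : (acc ++ [a]).Nodup := by
          simp [List.nodup_append, hnd]
          intro y hy rfl
          exact hmem hy
        obtain ⟨h1, h2⟩ := ih (acc ++ [a]) hnd'
        refine ⟨h1, fun x => ?_⟩
        rw [h2]
        simp only [List.mem_append, List.mem_cons]
        rcases eq_or_ne x a with rfl | hne
        · tauto
        · tauto
    · have hin2 : a ∉ arr1 := fun h =>
        hin ((PySem.Set.contains_iff _ _).mpr ((PySem.Set.mem_ofList _ _).mpr h))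
      rw [Bool.not_eq_true] at hin
      rw [hin]
      simp only [Bool.false_and, Bool.false_eq_true, if_false]
      obtain ⟨h1, h2⟩ := ih acc hnd
      refine ⟨h1, fun x => ?_⟩
      rw [h2]
      simp only [List.mem_cons]
      rcases eq_or_ne x a with rfl | hne
      · tauto
      · tauto

-- In a strictly increasing list whose elements are all ≤ x, a member x is last.
theorem last_of_mem_of_ub (res : List Int) (x : Int) (hres : res.Pairwise (· < ·))
    (hx : x ∈ res) (hub : ∀ r ∈ res, r ≤ x) : res.getLast? = some x := by
  induction res with
  | nil => cases hx
  | cons r rs ih =>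
    cases rs with
    | nil =>
      rcases List.mem_singleton.mp hx with rfl
      rfl
    | cons s ss =>
      have hxrs : x ∈ s :: ss := by
        rcases List.mem_cons.mp hx with rfl | h
        · exfalso
          have h1 : x < s := (List.pairwise_cons.mp hres).1 s List.mem_cons_self
          have h2 : s ≤ x := hub s (List.mem_cons_of_mem _ List.mem_cons_self)
          omega
        · exact h
      rw [List.getLast?_cons_cons]
      exact ih (List.pairwise_cons.mp hres).2 hxrs
        (fun t ht => hub t (List.mem_cons_of_mem _ ht))

-- Invariant of B's merge walk: with both lists nondecreasing and the accumulator
-- strictly increasing and below both heads, giaoMerge returns a strictly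
-- increasing list whose members are the accumulator's plus the common elements.
theorem giaoMerge_inv (a b : List Int) (res : List Int)
    (ha : a.Pairwise (· ≤ ·)) (hb : b.Pairwise (· ≤ ·))
    (hres : res.Pairwise (· < ·))
    (hub_a : ∀ r ∈ res, ∀ x ∈ a, r ≤ x) (hub_b : ∀ r ∈ res, ∀ y ∈ b, r ≤ y) :
    (giaoMerge res a b).Pairwise (· < ·) ∧
    ∀ z, z ∈ giaoMerge res a b ↔ z ∈ res ∨ (z ∈ a ∧ z ∈ b) := by
  match a, b with
  | [], b => simp [giaoMerge, hres]
  | x :: xs, [] => simp [giaoMerge, hres]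
  | x :: xs, y :: ys =>
    have hxxs : ∀ t ∈ xs, x ≤ t := fun t ht => (List.pairwise_cons.mp ha).1 t ht
    have hyys : ∀ t ∈ ys, y ≤ t := fun t ht => (List.pairwise_cons.mp hb).1 t ht
    have ha' : xs.Pairwise (· ≤ ·) := (List.pairwise_cons.mp ha).2
    have hb' : ys.Pairwise (· ≤ ·) := (List.pairwise_cons.mp hb).2
    by_cases hlt : x < y
    · rw [giaoMerge, if_pos hlt]
      obtain ⟨h1, h2⟩ := giaoMerge_inv xs (y :: ys) res ha' hb hres
        (fun r hr t ht => hub_a r hr t (List.mem_cons_of_mem _ ht)) hub_b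
      refine ⟨h1, fun z => ?_⟩
      rw [h2]
      constructor
      · rintro (h | ⟨h1', h2'⟩)
        · exact Or.inl h
        · exact Or.inr ⟨List.mem_cons_of_mem _ h1', h2'⟩
      · rintro (h | ⟨h1', h2'⟩)
        · exact Or.inl h
        · rcases List.mem_cons.mp h1' with rfl | hmem
          · exfalso
            rcases List.mem_cons.mp h2' with rfl | hm
            · exact absurd hlt (lt_irrefl _)
            · exact absurd (lt_of_lt_of_le hlt (hyys _ hm)) (lt_irrefl _)
          · exact Or.inr ⟨hmem, h2'⟩
    · by_cases hgt : y < x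
      · rw [giaoMerge, if_neg hlt, if_pos hgt]
        obtain ⟨h1, h2⟩ := giaoMerge_inv (x :: xs) ys res ha hb' hres
          hub_a (fun r hr t ht => hub_b r hr t (List.mem_cons_of_mem _ ht))
        refine ⟨h1, fun z => ?_⟩
        rw [h2]
        constructor
        · rintro (h | ⟨h1', h2'⟩)
          · exact Or.inl h
          · exact Or.inr ⟨h1', List.mem_cons_of_mem _ h2'⟩
        · rintro (h | ⟨h1', h2'⟩)
          · exact Or.inl h
          · rcases List.mem_cons.mp h2' with rfl | hmem
            · exfalso
              rcases List.mem_cons.mp h1' with rfl | hm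
              · exact absurd hgt (lt_irrefl _)
              · exact absurd (lt_of_lt_of_le hgt (hxxs _ hm)) (lt_irrefl _)
            · exact Or.inr ⟨h1', hmem⟩
      · have hxy : x = y := le_antisymm (not_lt.mp hgt) (not_lt.mp hlt)
        subst hxy
        have hmemset : ∀ z, (z ∈ x :: xs ∧ z ∈ x :: ys) ↔ z = x ∨ (z ∈ xs ∧ z ∈ ys) := by
          intro z
          constructor
          · rintro ⟨hz1, hz2⟩
            rcases List.mem_cons.mp hz1 with rfl | hm1
            · exact Or.inl rfl
            · rcases List.mem_cons.mp hz2 with rfl | hm2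
              · exact Or.inl rfl
              · exact Or.inr ⟨hm1, hm2⟩
          · rintro (rfl | ⟨hm1, hm2⟩)
            · exact ⟨List.mem_cons_self, List.mem_cons_self⟩
            · exact ⟨List.mem_cons_of_mem _ hm1, List.mem_cons_of_mem _ hm2⟩
        by_cases hlast : res.getLast? ≠ some x
        · rw [giaoMerge, if_neg (lt_irrefl x), if_neg (lt_irrefl x), if_pos hlast]
          have hxnot : x ∉ res := fun hx =>
            hlast (last_of_mem_of_ub res x hres hx
              (fun r hr => hub_a r hr x List.mem_cons_self))
          have hres' : (res ++ [x]).Pairwise (· < ·) := by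
            rw [List.pairwise_append]
            refine ⟨hres, List.pairwise_singleton _ _, fun r hr t ht => ?_⟩
            rw [List.mem_singleton.mp ht]
            exact lt_of_le_of_ne (hub_a r hr x List.mem_cons_self)
              (fun h => hxnot (h ▸ hr))
          obtain ⟨h1, h2⟩ := giaoMerge_inv xs ys (res ++ [x]) ha' hb' hres'
            (fun r hr t ht => by
              rcases List.mem_append.mp hr with hr' | hr'
              · exact hub_a r hr' t (List.mem_cons_of_mem _ ht)
              · rw [List.mem_singleton.mp hr']; exact hxxs t ht)
            (fun r hr t ht => by
              rcases List.mem_append.mp hr with hr' | hr'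
              · exact hub_b r hr' t (List.mem_cons_of_mem _ ht)
              · rw [List.mem_singleton.mp hr']; exact hyys t ht)
          refine ⟨h1, fun z => ?_⟩
          rw [h2]
          rw [show (z ∈ x :: xs ∧ z ∈ x :: ys) = (z = x ∨ (z ∈ xs ∧ z ∈ ys)) from propext (hmemset z)]
          simp only [List.mem_append, List.mem_singleton]
          tauto
        · rw [giaoMerge, if_neg (lt_irrefl x), if_neg (lt_irrefl x), if_neg hlast]
          have hxmem : x ∈ res := by
            rw [not_not] at hlast
            exact List.mem_of_getLast? hlast
          obtain ⟨h1, h2⟩ := giaoMerge_inv xs ys res ha' hb' hres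
            (fun r hr t ht => le_trans (hub_a r hr x List.mem_cons_self) (hxxs t ht))
            (fun r hr t ht => le_trans (hub_b r hr x List.mem_cons_self) (hyys t ht))
          refine ⟨h1, fun z => ?_⟩
          rw [h2]
          rw [show (z ∈ x :: xs ∧ z ∈ x :: ys) = (z = x ∨ (z ∈ xs ∧ z ∈ ys)) from propext (hmemset z)]
          constructor
          · rintro (h | h)
            · exact Or.inl h
            · exact Or.inr (Or.inr h)
          · rintro (h | rfl | h)
            · exact Or.inl h
            · exact Or.inl hxmem
            · exact Or.inr h
termination_by a.length + b.length
decreasing_by all_goals simp <;> omega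

-- ===== VERDICT (by name: the statement is the Claim_ definition above) =====
theorem Giao_spec : Claim_equal_Giao := by
  intro arr1 arr2 _
  unfold Spec_Giao Giao Giao_alt
  obtain ⟨hnd, hmem⟩ := giao_foldl_inv arr1 arr2 [] List.nodup_nil
  have hpa : (PySem.List.sorted arr1 (fun x => x) false).Pairwise (· ≤ ·) :=
    PySem.List.sorted_pairwise arr1 (fun x => x)
  have hpb : (PySem.List.sorted arr2 (fun x => x) false).Pairwise (· ≤ ·) :=
    PySem.List.sorted_pairwise arr2 (fun x => x)
  obtain ⟨hB1, hB2⟩ := giaoMerge_inv _ _ [] hpa hpb List.Pairwise.nil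
    (by simp) (by simp)
  apply PySem.List.sorted_eq_of_perm_of_pairwise_lt
  · apply (List.perm_ext_iff_of_nodup (hB1.imp ne_of_lt) hnd).mpr
    intro z
    rw [hmem z, hB2 z, PySem.List.mem_sorted, PySem.List.mem_sorted]
    tauto
  · exact hB1
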